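-- pv_equiv track=rewrite | github.com/karpidis/elo_calculator | round_robin.py | create_moved_list
-- ===== SOURCE A (Python) =====
-- def create_moved_list(list_of_players):
--     number_of_players = len(list_of_players)
--     half_list_len = int(number_of_players/2)
--
--     last_seat = list_of_players.pop(len(list_of_players) - 1)
--
--     list_of_players.extend(x for x in list_of_players[0:half_list_len])
--     list_of_players[0:half_list_len-1] = list_of_players[half_list_len:number_of_players-1]
--
--     del list_of_players[half_list_len-1:number_of_players-1]
--
--     list_of_players.append(last_seat)
--
--     return list_of_players
-- ===== SOURCE B (Python) =====
-- def create_moved_list(list_of_players):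
--     last_seat = list_of_players[-1]
--     half = len(list_of_players) // 2
--     middle = list_of_players[:-1]
--     list_of_players[:] = middle[half:] + middle[:half] + [last_seat]
--     return list_of_players
-- ===== Notes on version B (the rewrite author's own statement) =====
-- stated objective: simpler
-- what changed: A mutates the list through a pop, a self-extending generator, an overlapping slice assignment and a del; B computes the result directly as one rotation of the initial segment, middle[half:] + middle[:half] + [last], assigned back in place.
import Mathlib
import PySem

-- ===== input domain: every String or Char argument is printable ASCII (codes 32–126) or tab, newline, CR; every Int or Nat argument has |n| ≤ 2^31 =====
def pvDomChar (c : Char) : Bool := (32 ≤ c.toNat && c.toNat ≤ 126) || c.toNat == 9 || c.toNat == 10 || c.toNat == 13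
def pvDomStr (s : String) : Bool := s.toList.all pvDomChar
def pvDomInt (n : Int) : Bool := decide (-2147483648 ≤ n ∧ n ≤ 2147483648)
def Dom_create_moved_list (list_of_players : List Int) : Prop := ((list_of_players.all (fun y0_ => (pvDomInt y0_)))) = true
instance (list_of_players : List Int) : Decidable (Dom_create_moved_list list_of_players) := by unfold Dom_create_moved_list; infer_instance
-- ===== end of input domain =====

-- B replaces A's pop / self-extending generator / overlapping slice assignment / del sequence
-- by directly rebuilding the list as middle[half:] + middle[:half] + [last] (objective: simpler).
-- Both A and B mutate the argument in place; the equivalence proved here is about the return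
-- value (the in-place contents equal the return value in both).

-- ===== PORT A =====
-- Python step-1 slice index normalization: negative indices count from the end, clamped to [0, len].
def pyNormIdx (len : Nat) (i : Int) : Nat :=
  if i < 0 then ((len : Int) + i).toNat else min i.toNat len

-- Python `L[a:b] = R` for step-1 slices: result = L[:a'] ++ R ++ L[b':] with normalized, ordered bounds.
def pySliceAssign (L : List Int) (a b : Int) (R : List Int) : List Int :=
  let s := pyNormIdx L.length a
  let t := max s (pyNormIdx L.length b)
  L.take s ++ R ++ L.drop t

def create_moved_list (list_of_players : List Int) : List Int :=
  let n : Int := list_of_players.length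
  let half : Int := PySem.Int.floordiv n 2   -- int(n/2) = n // 2 for n ≥ 0
  match list_of_players.getLast? with
  | none => []   -- pop from the empty list raises IndexError; excluded by Pre_
  | some last_seat =>
    -- list_of_players.pop(len - 1)
    let ys := list_of_players.dropLast
    -- extend(x for x in ys[0:half])  (the slice is copied when the generator is created)
    let ys2 := ys ++ PySem.List.slice ys (some 0) (some half)
    -- ys2[0:half-1] = ys2[half:n-1]
    let ys3 := pySliceAssign ys2 0 (half - 1) (PySem.List.slice ys2 (some half) (some (n - 1)))
    -- del ys3[half-1:n-1]
    let ys4 := pySliceAssign ys3 (half - 1) (n - 1) []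
    ys4 ++ [last_seat]

-- ===== PORT B =====
def create_moved_list_alt (list_of_players : List Int) : List Int :=
  match list_of_players.getLast? with
  | none => []   -- list_of_players[-1] raises IndexError; excluded by Pre_
  | some last_seat =>
    let half : Int := PySem.Int.floordiv (list_of_players.length : Int) 2
    let middle := PySem.List.slice list_of_players none (some (-1))
    PySem.List.slice middle (some half) none ++ PySem.List.slice middle none (some half) ++ [last_seat]

-- ===== PRECONDITION & SPEC =====
-- Pre_ excludes only the empty list, on which A raises IndexError (pop from empty list).
def Pre_create_moved_list (list_of_players : List Int) : Prop := list_of_players ≠ []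
instance (list_of_players : List Int) : Decidable (Pre_create_moved_list list_of_players) := by
  unfold Pre_create_moved_list; infer_instance

def pvWitness_create_moved_list : List Int := [1, 2, 3, 4, 5]

def Spec_create_moved_list (list_of_players : List Int) (out : List Int) : Prop := out = create_moved_list_alt list_of_players
instance (list_of_players : List Int) (out : List Int) : Decidable (Spec_create_moved_list list_of_players out) := by unfold Spec_create_moved_list; infer_instance

-- ===== CLAIM (what is proved, stated in full; the proofs are below) =====
def Claim_equal_create_moved_list : Prop := ∀ (list_of_players : List Int), Dom_create_moved_list list_of_players → Pre_create_moved_list list_of_players → Spec_create_moved_list list_of_players (create_moved_list list_of_players)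

-- ===== LEMMAS AND PROOFS =====

theorem pyNormIdx_natCast (len k : Nat) : pyNormIdx len ((k : Nat) : Int) = min k len := by
  simp [pyNormIdx]

theorem assign1 (L R : List Int) (b : Nat) (hb : b ≤ L.length) :
    pySliceAssign L 0 ((b : Nat) : Int) R = R ++ L.drop b := by
  have h0 : pyNormIdx L.length 0 = 0 := by simp [pyNormIdx]
  simp [pySliceAssign, h0, pyNormIdx_natCast, Nat.min_eq_left hb]

theorem assign2 (L : List Int) (a b : Nat) (ha : a ≤ L.length) (hab : a ≤ b) (hb : b ≤ L.length) :
    pySliceAssign L ((a : Nat) : Int) ((b : Nat) : Int) [] = L.take a ++ L.drop b := by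
  simp [pySliceAssign, pyNormIdx_natCast, Nat.min_eq_left ha, Nat.min_eq_left hb,
    Nat.max_eq_right hab]

theorem create_moved_list_concat (ys : List Int) (last : Int) :
    create_moved_list (ys ++ [last]) = create_moved_list_alt (ys ++ [last]) := by
  have hgl : (ys ++ [last]).getLast? = some last := by simp
  have hdl : (ys ++ [last]).dropLast = ys := by simp
  rcases Nat.eq_zero_or_pos ys.length with hm0 | hm1
  · rw [List.length_eq_zero_iff] at hm0
    subst hm0
    simp [create_moved_list, create_moved_list_alt, pySliceAssign, pyNormIdx,
      PySem.Int.floordiv, PySem.List.slice]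
  · set m := ys.length with hmdef
    set h : Nat := (m + 1) / 2 with hhdef
    have hh1 : 1 ≤ h := by omega
    have hhm : h ≤ m := by omega
    have hbal : h - 1 ≤ m - h := by omega
    have hlen : (ys ++ [last]).length = m + 1 := by
      rw [List.length_append, List.length_singleton]
    have hhalf : PySem.Int.floordiv (((ys ++ [last]).length : Nat) : Int) 2 = (h : Int) := by
      rw [hlen, PySem.Int.floordiv_eq_ediv_of_pos (by omega)]
      push_cast
      omega
    simp only [create_moved_list, create_moved_list_alt, hgl, hdl, hhalf]
    -- name the intermediate lists
    have e1 : PySem.List.slice ys (some 0) (some ((h : Nat) : Int)) = ys.take h := by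
      rw [PySem.List.slice_zero_start, PySem.List.slice_to_natCast]
    have hl1 : ((((ys ++ [last]).length : Nat) : Int) - 1) = ((m : Nat) : Int) := by
      rw [hlen]; push_cast; ring
    have len2 : (ys ++ ys.take h).length = m + h := by
      simp; omega
    have e2 : PySem.List.slice (ys ++ ys.take h) (some ((h : Nat) : Int)) (some ((m : Nat) : Int))
        = ys.drop h := by
      rw [PySem.List.slice_natCast, List.drop_append]
      have : h - m = 0 := by omega
      rw [this, List.drop_zero]
      exact List.take_left' (by simp; omega)
    have e3 : (((h : Nat) : Int) - 1) = (((h - 1 : Nat)) : Int) := by omega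
    rw [e1, hl1, e2, e3]
    -- first slice assignment
    have eA : pySliceAssign (ys ++ ys.take h) 0 (((h - 1 : Nat)) : Int) (ys.drop h)
        = ys.drop h ++ (ys.drop (h - 1) ++ ys.take h) := by
      rw [assign1 _ _ _ (by omega)]
      rw [List.drop_append]
      have : h - 1 - m = 0 := by omega
      rw [this, List.drop_zero]
    rw [eA]
    have len3 : (ys.drop h ++ (ys.drop (h - 1) ++ ys.take h)).length = (m - h) + ((m - (h - 1)) + h) := by
      simp; omega
    -- the del
    have eB : pySliceAssign (ys.drop h ++ (ys.drop (h - 1) ++ ys.take h)) (((h - 1 : Nat)) : Int)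
          (((m : Nat)) : Int) [] = ys.drop h ++ ys.take h := by
      rw [assign2 _ _ _ (by rw [len3]; omega) (by omega) (by rw [len3]; omega)]
      rw [List.take_append_of_le_length (by simp; omega)]
      rw [List.drop_append]
      have hnil : List.drop m (ys.drop h) = [] := by
        apply List.drop_eq_nil_of_le; simp; omega
      have hlen' : (ys.drop h).length = m - h := by simp; omega
      rw [hnil, hlen']
      have hmh : m - (m - h) = h := by omega
      rw [hmh, List.drop_append_of_le_length (by simp; omega), List.drop_drop]
      have hdd : List.drop (h - 1 + h) ys = List.drop (h - 1) (List.drop h ys) := by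
        rw [List.drop_drop]; congr 1; omega
      rw [List.nil_append, hdd, ← List.append_assoc, List.take_append_drop]
    rw [eB]
    rw [PySem.List.slice_to_neg_one, hdl, PySem.List.slice_from_natCast,
      PySem.List.slice_to_natCast, List.append_assoc]

-- ===== VERDICT (by name: the statement is the Claim_ definition above) =====
theorem create_moved_list_spec : Claim_equal_create_moved_list := by
  intro xs _ hpre
  have h := List.dropLast_concat_getLast (l := xs) hpre
  rw [Spec_create_moved_list, ← h]
  exact create_moved_list_concat _ _
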